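-- pv_equiv track=rewrite | github.com/tdobber/AdventOfCode | 2018/day8.py | calculate_root_metadata
-- ===== SOURCE A (Python) =====
-- def calculate_root_metadata(data_list, metadata):
--     child_nodes = data_list[0]
--     amount_of_metadata = data_list[1]
--     data_list = data_list[2:]
--
--     if child_nodes != 0:
--         metadata_children = []
--         for i in range(0, child_nodes):
--             metadata_temp, data_list = calculate_root_metadata(data_list, 0)
--             metadata_children.append(metadata_temp)
--
--         metadata_indexes = data_list[:amount_of_metadata]
--         for index in metadata_indexes:
--             if 0 <= index - 1 < len(metadata_children):
--                 metadata += metadata_children[index - 1]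
--
--     else:
--         for k in range(0, amount_of_metadata):
--             metadata += data_list[k]
--
--     data_list = data_list[amount_of_metadata:]
--
--     return metadata, data_list
-- ===== SOURCE B (Python) =====
-- def calculate_root_metadata(data_list, metadata):
--     # Parse with a single shared index pointer instead of re-slicing the list
--     # at every node; the leftover data is produced by one final slice.
--     def node(i):
--         children, count = data_list[i], data_list[i + 1]
--         i += 2
--         values = []
--         for _ in range(children):
--             value, i = node(i)
--             values.append(value)
--         entries = data_list[i:i + count]
--         if children == 0:
--             total = sum(entries)
--         else:
--             total = sum(values[ref - 1] for ref in entries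
--                         if 1 <= ref <= len(values))
--         return total, i + count
--
--     value, end = node(0)
--     return metadata + value, data_list[end:]
-- ===== Notes on version B (the rewrite author's own statement) =====
-- stated objective: alternative
-- what changed: B parses the tree with a single shared index pointer into the list (entries read by one slice at the pointer, remainder by one final slice) instead of A's rebuilding a sliced copy of the list at every node; Pre_ excludes inputs on which A raises IndexError and malformed inputs whose parse reaches a node header with a negative metadata count, where A's remainder comes from accidental negative-slice clamping.
-- outside the precondition, e.g. on calculate_root_metadata([0, -1], 0): A returns (0, []), B returns (0, [-1]); on calculate_root_metadata([0, -2, 3], 0): A returns (0, [3]), B returns (0, [0, -2, 3])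
import Mathlib
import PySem

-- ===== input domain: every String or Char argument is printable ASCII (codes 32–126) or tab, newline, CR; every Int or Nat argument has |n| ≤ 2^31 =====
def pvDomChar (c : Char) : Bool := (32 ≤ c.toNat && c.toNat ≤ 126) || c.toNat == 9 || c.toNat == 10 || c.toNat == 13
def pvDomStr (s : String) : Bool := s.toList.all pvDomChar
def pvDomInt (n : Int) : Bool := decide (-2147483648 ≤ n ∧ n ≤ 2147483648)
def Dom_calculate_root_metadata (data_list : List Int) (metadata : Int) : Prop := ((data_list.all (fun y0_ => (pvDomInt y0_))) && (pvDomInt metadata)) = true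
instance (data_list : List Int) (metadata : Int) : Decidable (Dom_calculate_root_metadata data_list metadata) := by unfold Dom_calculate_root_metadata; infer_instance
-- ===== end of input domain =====

-- B parses the tree with one shared index pointer into the list (one final slice
-- for the remainder) instead of A's rebuilding a sliced copy of the list at every
-- node. Pre_ excludes inputs on which A raises IndexError and inputs with a
-- negative metadata count in a reached node header (malformed trees, where A's
-- slice-clamping remainder is accidental).


-- ===== PORT A =====
-- `for k in range(0, amount): metadata += data_list[k]` (IndexError = none)
def pAsum : Nat → Int → List Int → Int → Option Int
  | 0, _, _, m => some m
  | n+1, k, dl, m =>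
    match PySem.List.pyGet? dl k with
    | some v => pAsum n (k+1) dl (m + v)
    | none => none

mutual
-- literal transliteration of A; `fuel` only guards termination (2*len+2 bounds
-- the recursion depth), none = IndexError
def pA : Nat → List Int → Int → Option (Int × List Int)
  | 0, _, _ => none
  | fuel+1, data_list, metadata =>
    match PySem.List.pyGet? data_list 0, PySem.List.pyGet? data_list 1 with
    | some child_nodes, some amount_of_metadata =>
      let dl := PySem.List.slice data_list (some 2) none
      if child_nodes ≠ 0 then
        match pAkids fuel child_nodes.toNat [] dl with
        | some (metadata_children, dl2) =>
          let metadata_indexes := PySem.List.slice dl2 none (some amount_of_metadata)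
          let metadata2 := metadata_indexes.foldl
            (fun m index =>
              if 0 ≤ index - 1 ∧ index - 1 < (metadata_children.length : Int)
              then m + metadata_children.getD (index - 1).toNat 0 else m) metadata
          some (metadata2, PySem.List.slice dl2 (some amount_of_metadata) none)
        | none => none
      else
        match pAsum amount_of_metadata.toNat 0 dl metadata with
        | some m2 => some (m2, PySem.List.slice dl (some amount_of_metadata) none)
        | none => none
    | _, _ => none
termination_by f _ _ => (f, 0)

-- `for i in range(0, child_nodes): …` threading (metadata_children, data_list)
def pAkids : Nat → Nat → List Int → List Int → Option (List Int × List Int)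
  | _, 0, cs, dl => some (cs, dl)
  | fuel, k+1, cs, dl =>
    match pA fuel dl 0 with
    | some (v, dl2) => pAkids fuel k (cs ++ [v]) dl2
    | none => none
termination_by f k _ _ => (f, k+1)
end

def calculate_root_metadata (data_list : List Int) (metadata : Int) : Int × List Int :=
  (pA (2 * data_list.length + 2) data_list metadata).getD (0, [])

-- ===== PORT B =====
mutual
-- literal transliteration of B's `node(i)`; fuel only guards termination
def pBnode : Nat → List Int → Int → Option (Int × Int)
  | 0, _, _ => none
  | fuel+1, data, i =>
    match PySem.List.pyGet? data i, PySem.List.pyGet? data (i + 1) with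
    | some children, some count =>
      match pBkids fuel data children.toNat [] (i + 2) with
      | some (values, j) =>
        let entries := PySem.List.slice data (some j) (some (j + count))
        let total :=
          if children = 0 then entries.sum
          else entries.foldl (fun t ref =>
            if 1 ≤ ref ∧ ref ≤ (values.length : Int)
            then t + values.getD (ref - 1).toNat 0 else t) 0
        some (total, j + count)
      | none => none
    | _, _ => none
termination_by f _ _ => (f, 0)

-- `for _ in range(children): value, i = node(i); values.append(value)`
def pBkids : Nat → List Int → Nat → List Int → Int → Option (List Int × Int)
  | _, _, 0, vals, i => some (vals, i)
  | fuel, data, k+1, vals, i =>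
    match pBnode fuel data i with
    | some (v, i2) => pBkids fuel data k (vals ++ [v]) i2
    | none => none
termination_by f _ k _ _ => (f, k+1)
end

def calculate_root_metadata_alt (data_list : List Int) (metadata : Int) : Int × List Int :=
  match pBnode (2 * data_list.length + 2) data_list 0 with
  | some (v, pos) => (metadata + v, PySem.List.slice data_list (some pos) none)
  | none => (0, [])

-- ===== PRECONDITION & SPEC =====
-- shape check: `pvGo f k l = some r` iff the parse reads k node groups off l,
-- every reached node header has a nonnegative metadata count, and no leaf's
-- metadata count exceeds the remaining data (A's only IndexError source),
-- leaving r; the fuel only bounds the recursion depth (length+1 suffices).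
def pvGo : Nat → Nat → List Int → Option (List Int)
  | 0, _, _ => none
  | f+1, k, l =>
    match k with
    | 0 => some l
    | k+1 =>
      match l with
      | c :: m :: rest =>
        match pvGo f c.toNat rest with
        | some r1 =>
          if 0 ≤ m ∧ ¬(c = 0 ∧ (r1.length : Int) < m) then pvGo f k (r1.drop m.toNat)
          else none
        | none => none
      | _ => none

-- Pre_ excludes the inputs on which A raises IndexError, and also inputs whose
-- parse reaches a node header with a NEGATIVE metadata count: there A returns a
-- remainder produced by accidental negative-slice clamping (malformed input).
def Pre_calculate_root_metadata (data_list : List Int) (metadata : Int) : Prop :=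
  (pvGo (data_list.length + 1) 1 data_list).isSome = true
instance (data_list : List Int) (metadata : Int) : Decidable (Pre_calculate_root_metadata data_list metadata) := by
  unfold Pre_calculate_root_metadata; infer_instance

def pvWitness_calculate_root_metadata : List Int × Int :=
  ([2, 3, 0, 3, 10, 11, 12, 1, 1, 0, 1, 99, 2, 1, 1, 2], 0)

def Spec_calculate_root_metadata (data_list : List Int) (metadata : Int) (out : Int × List Int) : Prop := out = calculate_root_metadata_alt data_list metadata
instance (data_list : List Int) (metadata : Int) (out : Int × List Int) : Decidable (Spec_calculate_root_metadata data_list metadata out) := by unfold Spec_calculate_root_metadata; infer_instance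

-- ===== CLAIM (what is proved, stated in full; the proofs are below) =====
def Claim_equal_calculate_root_metadata : Prop := ∀ (data_list : List Int) (metadata : Int), Dom_calculate_root_metadata data_list metadata → Pre_calculate_root_metadata data_list metadata → Spec_calculate_root_metadata data_list metadata (calculate_root_metadata data_list metadata)

-- ===== LEMMAS AND PROOFS =====

theorem pvGo_eq_zero (f : Nat) (l : List Int) : pvGo (f+1) 0 l = some l := rfl
theorem pvGo_eq_nil (f k : Nat) : pvGo (f+1) (k+1) ([] : List Int) = none := rfl
theorem pvGo_eq_one (f k : Nat) (c : Int) : pvGo (f+1) (k+1) [c] = none := rfl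
theorem pvGo_eq_cons (f k : Nat) (c m : Int) (rest : List Int) :
    pvGo (f+1) (k+1) (c :: m :: rest) =
      (match pvGo f c.toNat rest with
       | some r1 =>
         if 0 ≤ m ∧ ¬(c = 0 ∧ (r1.length : Int) < m) then pvGo f k (r1.drop m.toNat)
         else none
       | none => none) := rfl

-- validity, fuel-free
def pvValid (k : Nat) (l r : List Int) : Prop := ∃ f, pvGo f k l = some r

theorem pvGo_mono {f k : Nat} {l r : List Int} (h : pvGo f k l = some r) :
    pvGo (f+1) k l = some r := by
  induction f generalizing k l r with
  | zero => simp [pvGo] at h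
  | succ f ih =>
    match k with
    | 0 => rw [pvGo_eq_zero] at h; rw [pvGo_eq_zero]; exact h
    | k+1 =>
      match l with
      | [] => rw [pvGo_eq_nil] at h; simp at h
      | [c] => rw [pvGo_eq_one] at h; simp at h
      | c :: m :: rest =>
        rw [pvGo_eq_cons] at h
        rw [pvGo_eq_cons]
        rcases h1 : pvGo f c.toNat rest with _ | r1
        · rw [h1] at h; simp at h
        · rw [h1] at h
          rw [ih h1]
          simp only at h ⊢
          split at h
          · rename_i hg
            rw [if_pos hg]
            exact ih h
          · simp at h

theorem pvGo_mono_le {f g k : Nat} {l r : List Int} (hfg : f ≤ g) (h : pvGo f k l = some r) :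
    pvGo g k l = some r := by
  induction g with
  | zero => have hf0 : f = 0 := by omega
            exact hf0 ▸ h
  | succ g ih =>
    rcases Nat.lt_or_ge f (g+1) with hlt | hge
    · exact pvGo_mono (ih (by omega))
    · have : f = g + 1 := by omega
      exact this ▸ h

theorem pvValid_zero {l r : List Int} : pvValid 0 l r ↔ r = l := by
  constructor
  · rintro ⟨f, hf⟩
    match f with
    | 0 => simp [pvGo] at hf
    | f+1 => rw [pvGo_eq_zero] at hf; exact (Option.some_inj.mp hf).symm
  · rintro rfl; exact ⟨1, rfl⟩

theorem pvValid_succ {k : Nat} {l r : List Int} :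
    pvValid (k+1) l r ↔
      ∃ c m rest r1, l = c :: m :: rest ∧
        pvValid c.toNat rest r1 ∧ (0 ≤ m ∧ ¬(c = 0 ∧ (r1.length : Int) < m)) ∧
        pvValid k (r1.drop m.toNat) r := by
  constructor
  · rintro ⟨f, hf⟩
    match f with
    | 0 => simp [pvGo] at hf
    | f+1 =>
      match l with
      | [] => rw [pvGo_eq_nil] at hf; simp at hf
      | [c] => rw [pvGo_eq_one] at hf; simp at hf
      | c :: m :: rest =>
        rw [pvGo_eq_cons] at hf
        rcases h1 : pvGo f c.toNat rest with _ | r1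
        · rw [h1] at hf; simp at hf
        · rw [h1] at hf
          simp only at hf
          split at hf
          · exact ⟨c, m, rest, r1, rfl, ⟨f, h1⟩, by assumption, ⟨f, hf⟩⟩
          · simp at hf
  · rintro ⟨c, m, rest, r1, rfl, ⟨f1, h1⟩, hg, ⟨f2, h2⟩⟩
    refine ⟨max f1 f2 + 1, ?_⟩
    rw [pvGo_eq_cons]
    rw [pvGo_mono_le (Nat.le_max_left f1 f2) h1]
    simp only
    rw [if_pos hg]
    exact pvGo_mono_le (Nat.le_max_right f1 f2) h2

theorem pAsum_spec : ∀ (n j : Nat) (dl : List Int) (m : Int), j + n ≤ dl.length →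
    pAsum n (j : Int) dl m = some (m + ((dl.drop j).take n).sum) := by
  intro n
  induction n with
  | zero => intro j dl m h; simp [pAsum]
  | succ n ih =>
    intro j dl m h
    have hj : j < dl.length := by omega
    have hget : PySem.List.pyGet? dl (j : Int) = some dl[j] := by
      rw [PySem.List.pyGet?_natCast]; exact List.getElem?_eq_getElem hj
    have hcast : (j : Int) + 1 = ((j + 1 : Nat) : Int) := by push_cast; ring
    rw [pAsum, hget, hcast]
    show pAsum n ((j+1 : Nat) : Int) dl (m + dl[j]) = _
    rw [ih (j+1) dl (m + dl[j]) (by omega)]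
    rw [List.drop_eq_getElem_cons hj, List.take_succ_cons, List.sum_cons, ← add_assoc]

-- A folds the guarded index sum starting at `metadata`, B starting at 0
theorem foldG_init (l vals : List Int) (m0 : Int) :
    l.foldl (fun t idx =>
        if 0 ≤ idx - 1 ∧ idx - 1 < (vals.length : Int)
        then t + vals.getD (idx - 1).toNat 0 else t) m0
    = m0 + l.foldl (fun t idx =>
        if 0 ≤ idx - 1 ∧ idx - 1 < (vals.length : Int)
        then t + vals.getD (idx - 1).toNat 0 else t) 0 := by
  have h : (fun (t idx : Int) =>
      if 0 ≤ idx - 1 ∧ idx - 1 < (vals.length : Int)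
      then t + vals.getD (idx - 1).toNat 0 else t)
      = (fun (t idx : Int) =>
      t + (if 0 ≤ idx - 1 ∧ idx - 1 < (vals.length : Int)
           then vals.getD (idx - 1).toNat 0 else 0)) := by
    funext t idx
    split <;> simp
  rw [h, PySem.List.foldl_add, PySem.List.foldl_add]
  simp

-- B's `1 ≤ ref ≤ len(values)` guard is A's `0 ≤ index-1 < len` guard
theorem foldB_eq_foldA (vals : List Int) :
    (fun (t ref : Int) =>
      if 1 ≤ ref ∧ ref ≤ (vals.length : Int)
      then t + vals.getD (ref - 1).toNat 0 else t)
    = (fun (t idx : Int) =>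
      if 0 ≤ idx - 1 ∧ idx - 1 < (vals.length : Int)
      then t + vals.getD (idx - 1).toNat 0 else t) := by
  funext t x
  have h : (1 ≤ x ∧ x ≤ (vals.length : Int)) ↔ (0 ≤ x - 1 ∧ x - 1 < (vals.length : Int)) := by
    omega
  exact if_congr h rfl rfl

-- a slice of a suffix, written with absolute bounds
theorem slice_abs_to (data : List Int) (j : Nat) (m : Int) (hm : 0 ≤ m) :
    PySem.List.slice data (some (j : Int)) (some ((j : Int) + m))
      = PySem.List.slice (data.drop j) none (some m) := by
  rw [show (j : Int) + m = ((j + m.toNat : Nat) : Int) by push_cast [Int.toNat_of_nonneg hm]; ring,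
     PySem.List.slice_natCast, PySem.List.slice_to _ hm]
  rw [show j + m.toNat - j = m.toNat by omega]

theorem pAkids_acc (f : Nat) : ∀ (k : Nat) (cs dl : List Int),
    pAkids f k cs dl = (pAkids f k [] dl).map (fun p => (cs ++ p.1, p.2)) := by
  intro k
  induction k with
  | zero => intro cs dl; simp [pAkids]
  | succ k ih =>
    intro cs dl
    rw [pAkids, pAkids]
    rcases h : pA f dl 0 with _ | ⟨v, dl2⟩
    · simp
    · simp only
      rw [ih (cs ++ [v]) dl2, ih ([] ++ [v]) dl2]
      cases pAkids f k [] dl2 <;> simp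

theorem pBkids_acc (f : Nat) (data : List Int) : ∀ (k : Nat) (vals : List Int) (i : Int),
    pBkids f data k vals i = (pBkids f data k [] i).map (fun p => (vals ++ p.1, p.2)) := by
  intro k
  induction k with
  | zero => intro vals i; simp [pBkids]
  | succ k ih =>
    intro vals i
    rw [pBkids, pBkids]
    rcases h : pBnode f data i with _ | ⟨v, i2⟩
    · simp
    · simp only
      rw [ih (vals ++ [v]) i2, ih ([] ++ [v]) i2]
      cases pBkids f data k [] i2 <;> simp

theorem pA_step (fuel : Nat) (l : List Int) (md c m : Int)
    (h0 : PySem.List.pyGet? l 0 = some c) (h1 : PySem.List.pyGet? l 1 = some m) :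
    pA (fuel+1) l md =
      (if c ≠ 0 then
        match pAkids fuel c.toNat [] (PySem.List.slice l (some 2) none) with
        | some (cs, dl2) =>
          some ((PySem.List.slice dl2 none (some m)).foldl
            (fun mm index => if 0 ≤ index - 1 ∧ index - 1 < (cs.length : Int)
              then mm + cs.getD (index - 1).toNat 0 else mm) md,
            PySem.List.slice dl2 (some m) none)
        | none => none
      else
        match pAsum m.toNat 0 (PySem.List.slice l (some 2) none) md with
        | some m2 => some (m2, PySem.List.slice (PySem.List.slice l (some 2) none) (some m) none)
        | none => none) := by
  rw [pA, h0, h1]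

theorem pB_step (fuel : Nat) (data : List Int) (i c m : Int)
    (h0 : PySem.List.pyGet? data i = some c) (h1 : PySem.List.pyGet? data (i + 1) = some m) :
    pBnode (fuel+1) data i =
      (match pBkids fuel data c.toNat [] (i + 2) with
       | some (vals, j) =>
         some ((if c = 0 then (PySem.List.slice data (some j) (some (j + m))).sum
                else (PySem.List.slice data (some j) (some (j + m))).foldl
                  (fun t ref => if 1 ≤ ref ∧ ref ≤ (vals.length : Int)
                    then t + vals.getD (ref - 1).toNat 0 else t) 0),
           j + m)
       | none => none) := by
  rw [pBnode, h0, h1]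

theorem pv_main (f : Nat) (data : List Int) :
    (∀ (i : Nat) (r : List Int), pvValid 1 (data.drop i) r → data.length - i < f →
      ∃ (v : Int) (j : Nat),
        (∀ m0 : Int, pA f (data.drop i) m0 = some (m0 + v, r)) ∧
        pBnode f data (i : Int) = some (v, (j : Int)) ∧
        i ≤ j ∧ data.drop j = r)
    ∧
    (∀ (k i : Nat) (r : List Int), pvValid k (data.drop i) r → data.length - i < f →
      ∃ (vs : List Int) (j : Nat),
        pAkids f k [] (data.drop i) = some (vs, r) ∧
        pBkids f data k [] (i : Int) = some (vs, (j : Int)) ∧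
        i ≤ j ∧ data.drop j = r) := by
  induction f with
  | zero =>
    exact ⟨fun i r _ hf => absurd hf (by omega),
           fun k i r _ hf => absurd hf (by omega)⟩
  | succ f ihf =>
    have main : ∀ (i : Nat) (r : List Int), pvValid 1 (data.drop i) r →
        data.length - i < f + 1 →
        ∃ (v : Int) (j : Nat),
          (∀ m0 : Int, pA (f+1) (data.drop i) m0 = some (m0 + v, r)) ∧
          pBnode (f+1) data (i : Int) = some (v, (j : Int)) ∧
          i ≤ j ∧ data.drop j = r := by
      intro i r hval hf1
      rcases pvValid_succ.mp hval with ⟨c, m, rest, r1, hl, hv1, ⟨hm, hg⟩, hv0⟩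
      have hr : r = r1.drop m.toNat := pvValid_zero.mp hv0
      have hli : data.length - i = rest.length + 2 := by
        have := congrArg List.length hl
        simp at this; omega
      have h2 : i + 2 ≤ data.length := by omega
      have hrest : data.drop (i+2) = rest := by
        have h2' : List.drop 2 (data.drop i) = rest := by rw [hl]; rfl
        rwa [List.drop_drop] at h2'
      have hrestlen : rest.length = data.length - (i+2) := by rw [← hrest]; simp
      have hgA0 : PySem.List.pyGet? (data.drop i) 0 = some c := by
        rw [hl]; exact PySem.List.pyGet?_zero_cons ..
      have hgA1 : PySem.List.pyGet? (data.drop i) 1 = some m := by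
        rw [hl, show (1:Int) = ((1:Nat):Int) by norm_num, PySem.List.pyGet?_natCast]; rfl
      have hgB0 : PySem.List.pyGet? data (i : Int) = some c := by
        rw [PySem.List.pyGet?_natCast]
        have h0' : (data.drop i)[0]? = some c := by rw [hl]; rfl
        rw [List.getElem?_drop] at h0'; simpa using h0'
      have hgB1 : PySem.List.pyGet? data ((i : Int) + 1) = some m := by
        rw [show ((i:Int)+1) = ((i+1 : Nat) : Int) by push_cast; ring,
           PySem.List.pyGet?_natCast]
        have h1' : (data.drop i)[1]? = some m := by rw [hl]; rfl
        rw [List.getElem?_drop] at h1'; exact h1'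
      have hslice2 : PySem.List.slice (data.drop i) (some 2) none = rest := by
        rw [show (2:Int) = ((2:Nat):Int) by norm_num, PySem.List.slice_from_natCast, hl]; rfl
      have e1 : (i:Int) + 2 = ((i+2 : Nat) : Int) := by push_cast; ring
      -- children via the induction hypothesis at fuel f (empty loop when c ≤ 0)
      have hv1' : pvValid c.toNat (data.drop (i+2)) r1 := by rw [hrest]; exact hv1
      obtain ⟨vs, j1, hAk, hBk, hij1, hdropj1⟩ :=
        ihf.2 c.toNat (i+2) r1 hv1' (by omega)
      have hAk' : pAkids f c.toNat [] rest = some (vs, r1) := by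
        rw [← hrest]; exact hAk
      have hBentries : PySem.List.slice data (some (j1:Int)) (some ((j1:Int) + m))
          = PySem.List.slice r1 none (some m) := by
        rw [slice_abs_to data j1 m hm, hdropj1]
      have hptr : (j1 : Int) + m = ((j1 + m.toNat : Nat) : Int) := by
        push_cast [Int.toNat_of_nonneg hm]; ring
      have hdropend : data.drop (j1 + m.toNat) = r1.drop m.toNat := by
        rw [← hdropj1, List.drop_drop]
      by_cases hc0 : c = 0
      · -- leaf node: A sums the metadata entries by index, B sums one slice
        subst hc0
        have hAE : pAkids f (Int.toNat 0) [] rest = some ([], rest) := by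
          simp [pAkids]
        rw [hAE] at hAk'
        obtain ⟨hvs, hr1⟩ : ([] : List Int) = vs ∧ rest = r1 := by
          simpa using hAk'
        have hmle : m.toNat ≤ r1.length := by
          simp at hg; omega
        refine ⟨(r1.take m.toNat).sum, j1 + m.toNat, ?_, ?_, by omega, ?_⟩
        · intro m0
          rw [pA_step f _ m0 0 m hgA0 hgA1, if_neg (by simp), hslice2]
          have hsum := pAsum_spec m.toNat 0 rest m0 (by rw [hr1]; omega)
          rw [Nat.cast_zero, List.drop_zero] at hsum
          rw [hsum, PySem.List.slice_from rest hm, hr, ← hr1]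
        · rw [pB_step f data (i:Int) 0 m hgB0 hgB1, e1, hBk]
          simp only [reduceIte]
          rw [hBentries, PySem.List.slice_to _ hm, hptr]
        · rw [hr, hdropend]
      · -- internal node: A folds over a slice of the rebuilt list, B over the
        -- same slice taken at the pointer
        refine ⟨(PySem.List.slice r1 none (some m)).foldl
            (fun t idx => if 0 ≤ idx - 1 ∧ idx - 1 < (vs.length : Int)
              then t + vs.getD (idx - 1).toNat 0 else t) 0,
            j1 + m.toNat, ?_, ?_, by omega, ?_⟩
        · intro m0
          rw [pA_step f _ m0 c m hgA0 hgA1, if_pos hc0, hslice2, hAk']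
          simp only
          rw [foldG_init, hr, PySem.List.slice_from r1 hm]
        · rw [pB_step f data (i:Int) c m hgB0 hgB1, e1, hBk]
          simp only [if_neg hc0]
          rw [hBentries, foldB_eq_foldA, hptr]
        · rw [hr, hdropend]
    refine ⟨main, ?_⟩
    intro k
    induction k with
    | zero =>
      intro i r hval _
      have hrl : r = data.drop i := pvValid_zero.mp hval
      exact ⟨[], i, by rw [pAkids, hrl], by rw [pBkids], le_rfl, hrl.symm⟩
    | succ k ihk =>
      intro i r hval hf1
      rcases pvValid_succ.mp hval with ⟨c, m, rest, r1, hl, hv1, hg, hvk⟩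
      have hmid : pvValid 1 (data.drop i) (r1.drop m.toNat) :=
        pvValid_succ.mpr ⟨c, m, rest, r1, hl, hv1, hg, pvValid_zero.mpr rfl⟩
      obtain ⟨v, j1, hA1, hB1, hij1, hdrop1⟩ := main i (r1.drop m.toNat) hmid hf1
      have hvk' : pvValid k (data.drop j1) r := by rw [hdrop1]; exact hvk
      obtain ⟨vs, j2, hAk, hBk, hj12, hdrop2⟩ := ihk j1 r hvk' (by omega)
      have hA1' : pA (f+1) (data.drop i) 0 = some (v, r1.drop m.toNat) := by
        simpa using hA1 0
      refine ⟨v :: vs, j2, ?_, ?_, by omega, hdrop2⟩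
      · rw [pAkids, hA1']
        show pAkids (f+1) k ([] ++ [v]) (r1.drop m.toNat) = some (v :: vs, r)
        rw [← hdrop1, pAkids_acc (f+1) k ([] ++ [v]) (data.drop j1), hAk]
        simp
      · rw [pBkids, hB1]
        show pBkids (f+1) data k ([] ++ [v]) (j1:Int) = some (v :: vs, (j2:Int))
        rw [pBkids_acc (f+1) data k ([] ++ [v]) (j1:Int), hBk]
        simp

-- ===== VERDICT (by name: the statement is the Claim_ definition above) =====
theorem calculate_root_metadata_spec : Claim_equal_calculate_root_metadata := by
  intro data m hDom hPre
  unfold Spec_calculate_root_metadata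
  unfold Pre_calculate_root_metadata at hPre
  obtain ⟨r, hr⟩ := Option.isSome_iff_exists.mp hPre
  have hval : pvValid 1 data r := ⟨data.length + 1, hr⟩
  have hval' : pvValid 1 (data.drop 0) r := by simpa using hval
  obtain ⟨v, j, hA, hB, _, hdrop⟩ :=
    (pv_main (2 * data.length + 2) data).1 0 r hval' (by omega)
  have hA' := hA m
  simp only [List.drop_zero] at hA'
  have hB' : pBnode (2 * data.length + 2) data 0 = some (v, (j : Int)) := by
    simpa using hB
  unfold calculate_root_metadata calculate_root_metadata_alt
  rw [hA', hB']
  simp [PySem.List.slice_from_natCast, hdrop]
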